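-- pv_equiv track=rewrite | github.com/sunnyflyingsky/zhang-lab | working/02.regression_classification/processor.py | trans_protein
-- ===== SOURCE A (Python) =====
-- nucleic_char = ['A', 'U', 'C', 'G']  # 4
--
-- MAX_SEQ_PROTEIN = 31
--
-- def trans_protein(x):
--     '''
--     截取31bp长的RNA序列
--     '''
--     temp = list(x.upper())
--     temp = [i if i in nucleic_char else 'N' for i in temp]
--     if len(temp) < MAX_SEQ_PROTEIN:
--         temp = temp + ['N'] * (MAX_SEQ_PROTEIN - len(temp))
--     else:
--         temp = temp[:MAX_SEQ_PROTEIN]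
--     return temp
-- ===== SOURCE B (Python) =====
-- NUC = {'A', 'U', 'C', 'G'}
--
-- MAX_SEQ_PROTEIN = 31
--
-- def trans_protein(x):
--     def go(chars, k):
--         if k == 0:
--             return []
--         if chars:
--             c = chars[0]
--             return [c if c in NUC else 'N'] + go(chars[1:], k - 1)
--         return ['N'] * k
--     return go(list(x.upper()), MAX_SEQ_PROTEIN)
-- ===== Notes on version B (the rewrite author's own statement) =====
-- stated objective: alternative
-- what changed: B replaces A's staged map-then-pad/truncate pipeline with a single structural recursion over the first 31 characters, carrying a countdown and emitting the normalized character or a padding character at each step.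
import Mathlib
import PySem

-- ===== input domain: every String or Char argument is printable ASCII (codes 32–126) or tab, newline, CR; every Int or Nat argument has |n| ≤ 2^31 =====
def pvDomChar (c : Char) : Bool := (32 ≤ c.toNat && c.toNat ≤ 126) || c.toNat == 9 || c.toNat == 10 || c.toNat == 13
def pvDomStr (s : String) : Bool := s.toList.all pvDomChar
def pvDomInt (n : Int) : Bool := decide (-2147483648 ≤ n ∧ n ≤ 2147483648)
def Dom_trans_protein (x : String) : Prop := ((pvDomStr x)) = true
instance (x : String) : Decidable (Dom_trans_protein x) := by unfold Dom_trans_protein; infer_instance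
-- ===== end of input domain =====

-- ===== PORT A =====
-- B replaces A's staged map-then-pad/truncate pipeline with one structural recursion over the first 31 characters (countdown accumulator); objective: alternative, same cost.
def trans_protein (x : String) : List String :=
  let temp := (PySem.Str.upper x).toList.map (fun c => String.ofList [c])
  let temp2 := temp.map (fun i => if i ∈ (["A", "U", "C", "G"] : List String) then i else "N")
  if temp2.length < 31 then temp2 ++ List.replicate (31 - temp2.length) "N"
  else PySem.List.slice temp2 none (some (31 : Int))

-- ===== PORT B =====
-- go chars k: emit min(k, |chars|) normalized characters, then pad the rest with "N".
def transProteinGo : List Char → Nat → List String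
  | _, 0 => []
  | c :: rest, Nat.succ k =>
      (if c ∈ (['A', 'U', 'C', 'G'] : List Char) then String.ofList [c] else "N") ::
        transProteinGo rest k
  | [], Nat.succ k => List.replicate (Nat.succ k) "N"

def trans_protein_alt (x : String) : List String :=
  transProteinGo (PySem.Str.upper x).toList 31

-- ===== PRECONDITION & SPEC =====
def Spec_trans_protein (x : String) (out : List String) : Prop := out = trans_protein_alt x
instance (x : String) (out : List String) : Decidable (Spec_trans_protein x out) := by unfold Spec_trans_protein; infer_instance

-- ===== CLAIM =====
def Claim_equal_trans_protein : Prop := ∀ (x : String), Dom_trans_protein x → Spec_trans_protein x (trans_protein x)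

-- ===== LEMMAS AND PROOFS =====
theorem trans_protein_mem_iff (c : Char) :
    (String.ofList [c] ∈ (["A", "U", "C", "G"] : List String)) ↔
      (c ∈ (['A', 'U', 'C', 'G'] : List Char)) := by
  have h : ∀ a : Char, String.ofList [c] = String.ofList [a] ↔ c = a := by
    intro a
    constructor
    · intro h
      have := congrArg String.toList h
      simpa using this
    · intro h; rw [h]
  simp only [List.mem_cons, List.not_mem_nil, or_false]
  rw [show ("A" : String) = String.ofList ['A'] from rfl,
      show ("U" : String) = String.ofList ['U'] from rfl,
      show ("C" : String) = String.ofList ['C'] from rfl,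
      show ("G" : String) = String.ofList ['G'] from rfl, h, h, h, h]

theorem trans_protein_go_eq (chars : List Char) (k : Nat) :
    (if chars.length < k
     then (chars.map (fun c => if String.ofList [c] ∈ (["A", "U", "C", "G"] : List String)
             then String.ofList [c] else "N")) ++ List.replicate (k - chars.length) "N"
     else (chars.map (fun c => if String.ofList [c] ∈ (["A", "U", "C", "G"] : List String)
             then String.ofList [c] else "N")).take k)
    = transProteinGo chars k := by
  induction chars generalizing k with
  | nil =>
    cases k with
    | zero => simp [transProteinGo]
    | succ k => simp [transProteinGo]
  | cons c rest ih =>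
    cases k with
    | zero => simp [transProteinGo]
    | succ k =>
      have hhead : (if String.ofList [c] ∈ (["A", "U", "C", "G"] : List String)
            then String.ofList [c] else "N")
          = (if c ∈ (['A', 'U', 'C', 'G'] : List Char) then String.ofList [c] else "N") := by
        simp only [trans_protein_mem_iff]
      rw [transProteinGo, ← hhead, ← ih k]
      by_cases h : rest.length < k
      · simp [h, Nat.succ_sub_succ]
      · simp [h]

-- ===== VERDICT =====
theorem trans_protein_spec : Claim_equal_trans_protein := by
  intro x _
  unfold Spec_trans_protein trans_protein trans_protein_alt
  simp only
  rw [PySem.List.slice_to _ (by norm_num : (0:Int) ≤ 31)]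
  rw [List.map_map]
  have := trans_protein_go_eq (PySem.Str.upper x).toList 31
  simpa using this
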